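-- pv_equiv track=rewrite | github.com/davidlmorton/spikepy | spikepy/common/projection_utils.py | get_projection_combinations
-- ===== SOURCE A (Python) =====
-- import itertools
--
-- def get_projection_combinations(keys):
--     pc = list()
--     for i, j in itertools.product(keys, keys):
--         if i != j:
--             s = (i, j)
--             st = (j, i)
--             if s not in pc and st not in pc:
--                 pc.append(s)
--     return pc
-- ===== SOURCE B (Python) =====
-- def get_projection_combinations(keys):
--     distinct = []
--     for k in keys:
--         if k not in distinct:
--             distinct.append(k)
--     result = []
--     for idx, x in enumerate(distinct):
--         for y in distinct[idx + 1:]: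
--             result.append((x, y))
--     return result
-- ===== Notes on version B (the rewrite author's own statement) =====
-- stated objective: faster
-- what changed: Replaces A's full n*n product scan with quadratic-cost membership tests on the growing pair list by a single dedup pass over keys followed by direct generation of each (earlier, later) pair of the distinct keys.
import Mathlib
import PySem

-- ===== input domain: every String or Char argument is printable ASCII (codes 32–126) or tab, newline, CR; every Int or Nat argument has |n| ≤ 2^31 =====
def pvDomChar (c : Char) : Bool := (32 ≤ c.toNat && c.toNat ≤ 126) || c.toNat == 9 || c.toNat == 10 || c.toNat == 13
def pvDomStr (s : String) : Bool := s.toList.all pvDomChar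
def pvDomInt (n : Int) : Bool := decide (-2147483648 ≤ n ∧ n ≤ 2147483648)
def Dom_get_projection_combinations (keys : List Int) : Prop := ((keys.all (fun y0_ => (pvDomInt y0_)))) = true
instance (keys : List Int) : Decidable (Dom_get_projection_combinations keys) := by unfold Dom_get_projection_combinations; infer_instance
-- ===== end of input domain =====

-- B replaces A's n*n product scan with membership dedup of the growing pair list by a
-- single dedup pass over keys followed by direct generation of the (earlier, later)
-- pairs of the distinct keys (objective: faster).

-- ===== PORT A =====
-- one step of A's loop body: for (i, j) skip if i == j, else append (i, j) unless
-- (i, j) or (j, i) is already in pc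
def pvStepA (pc : List (Int × Int)) (s : Int × Int) : List (Int × Int) :=
  if s.1 ≠ s.2 then
    if s ∉ pc ∧ (s.2, s.1) ∉ pc then pc ++ [s] else pc
  else pc

def get_projection_combinations (keys : List Int) : List (Int × Int) :=
  -- itertools.product(keys, keys) iterates in row order: flatMap of the rows
  (keys.flatMap (fun i => keys.map (fun j => (i, j)))).foldl pvStepA []

-- ===== PORT B =====
-- first loop of Source B: distinct keys in first-appearance order
def pvDistinct (keys : List Int) : List Int :=
  keys.foldl (fun d k => if k ∈ d then d else d ++ [k]) []

-- second loop of Source B: for each x, all pairs (x, y) with y after x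
def pvPairsFrom : List Int → List (Int × Int)
  | [] => []
  | x :: rest => rest.map (fun y => (x, y)) ++ pvPairsFrom rest

def get_projection_combinations_alt (keys : List Int) : List (Int × Int) :=
  pvPairsFrom (pvDistinct keys)

-- ===== PRECONDITION & SPEC =====
def Spec_get_projection_combinations (keys : List Int) (out : List (Int × Int)) : Prop := out = get_projection_combinations_alt keys
instance (keys : List Int) (out : List (Int × Int)) : Decidable (Spec_get_projection_combinations keys out) := by unfold Spec_get_projection_combinations; infer_instance

-- ===== CLAIM (what is proved, stated in full; the proofs are below) =====
def Claim_equal_get_projection_combinations : Prop := ∀ (keys : List Int), Dom_get_projection_combinations keys → Spec_get_projection_combinations keys (get_projection_combinations keys)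

-- ===== LEMMAS AND PROOFS =====

-- recursive formulation of first-appearance dedup, used only inside the proofs
def pvDedup : List Int → List Int
  | [] => []
  | x :: xs => x :: pvDedup (xs.filter (fun y => decide (y ≠ x)))
termination_by xs => xs.length
decreasing_by
  simp only [List.length_unattach, List.length_cons]
  exact Nat.lt_succ_of_le (le_trans (List.length_filter_le _ _) (le_of_eq List.length_attach))

-- induction principle following pvDedup's recursion
theorem pvDedup_ind (P : List Int → Prop) (base : P [])
    (step : ∀ x xs, P (xs.filter (fun y => decide (y ≠ x))) → P (x :: xs)) : ∀ xs, P xs := by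
  have key : ∀ n xs, xs.length ≤ n → P xs := by
    intro n
    induction n with
    | zero =>
      intro xs h
      cases xs with
      | nil => exact base
      | cons x xs => simp at h
    | succ n ih =>
      intro xs h
      cases xs with
      | nil => exact base
      | cons x xs =>
        exact step x xs (ih _ (le_trans (List.length_filter_le _ _) (Nat.le_of_succ_le_succ h)))
  exact fun xs => key xs.length xs le_rfl

theorem pv_mem_dedup (a : Int) : ∀ xs : List Int, a ∈ pvDedup xs ↔ a ∈ xs := by
  refine pvDedup_ind _ (by simp [pvDedup]) ?_
  intro x xs ih
  rw [pvDedup]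
  simp only [List.mem_cons, ih, List.mem_filter, decide_eq_true_eq]
  by_cases h : a = x <;> simp [h]

theorem pv_dedup_filter : ∀ xs : List Int, ∀ p : Int → Bool,
    pvDedup (xs.filter p) = (pvDedup xs).filter p := by
  refine pvDedup_ind _ (by simp [pvDedup]) ?_
  intro x xs ih p
  by_cases h : p x
  · rw [List.filter_cons_of_pos h, pvDedup, pvDedup, List.filter_cons_of_pos h,
      List.filter_comm, ih]
  · rw [List.filter_cons_of_neg h, pvDedup, List.filter_cons_of_neg h,
      show xs.filter p = (xs.filter (fun y => decide (y ≠ x))).filter p by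
        rw [List.filter_comm]
        refine (List.filter_eq_self.2 ?_).symm
        intro y hy
        simp only [decide_eq_true_eq]
        rintro rfl
        exact h (List.mem_filter.1 hy).2]
    exact ih p

theorem pv_nodup_dedup : ∀ xs : List Int, (pvDedup xs).Nodup := by
  refine pvDedup_ind _ (by simp [pvDedup]) ?_
  intro x xs ih
  rw [pvDedup]
  refine List.nodup_cons.2 ⟨?_, ih⟩
  rw [pv_mem_dedup]
  simp

theorem pv_distinct_loop (xs : List Int) : ∀ d : List Int,
    xs.foldl (fun d k => if k ∈ d then d else d ++ [k]) d
      = d ++ pvDedup (xs.filter (fun k => decide (k ∉ d))) := by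
  induction xs with
  | nil => intro d; simp [pvDedup]
  | cons x xs ih =>
    intro d
    by_cases h : x ∈ d
    · rw [List.foldl_cons, if_pos h, ih, List.filter_cons_of_neg (by simp [h])]
    · rw [List.foldl_cons, if_neg h, ih, List.filter_cons_of_pos (by simp [h]),
        pvDedup, List.filter_filter]
      have he : (xs.filter fun a => decide (a ≠ x) && decide (a ∉ d))
          = xs.filter fun k => decide (k ∉ d ++ [x]) := by
        refine List.filter_congr ?_
        intro y _
        by_cases hy : y = x <;> simp [hy, h]
      rw [he]
      simp

theorem pv_distinct_eq (keys : List Int) : pvDistinct keys = pvDedup keys := by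
  rw [pvDistinct, pv_distinct_loop]
  simp

-- A's inner row for a fixed i = x: the appended pairs are (x, y) for the first
-- occurrences y of the columns with y ≠ x and the unordered pair not yet in pc
theorem pv_row (x : Int) : ∀ (cols : List Int) (pc : List (Int × Int)),
    (cols.map (fun j => (x, j))).foldl pvStepA pc
      = pc ++ ((pvDedup cols).filter
          (fun y => decide (y ≠ x ∧ (x, y) ∉ pc ∧ (y, x) ∉ pc))).map (fun y => (x, y)) := by
  intro cols
  induction cols with
  | nil => intro pc; simp [pvDedup]
  | cons c cs ih =>
    intro pc
    rw [List.map_cons, List.foldl_cons, pvDedup, pv_dedup_filter]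
    by_cases hcx : c = x
    · subst hcx
      have hstep : pvStepA pc (c, c) = pc := by simp [pvStepA]
      have hfil : ((pvDedup cs).filter (fun y => decide (y ≠ c))).filter
            (fun y => decide (y ≠ c ∧ (c, y) ∉ pc ∧ (y, c) ∉ pc))
          = (pvDedup cs).filter (fun y => decide (y ≠ c ∧ (c, y) ∉ pc ∧ (y, c) ∉ pc)) := by
        rw [List.filter_filter]
        refine List.filter_congr ?_
        intro y _
        by_cases hy : y = c <;> simp [hy]
      rw [hstep, ih, List.filter_cons_of_neg (by simp), hfil]
    · by_cases hmem : (x, c) ∉ pc ∧ (c, x) ∉ pc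
      · have hstep : pvStepA pc (x, c) = pc ++ [(x, c)] := by
          simp only [pvStepA, ne_eq, ite_not]
          rw [if_neg (fun h => hcx h.symm), if_pos hmem]
        have hfil : (pvDedup cs).filter
              (fun y => decide (y ≠ x ∧ (x, y) ∉ pc ++ [(x, c)] ∧ (y, x) ∉ pc ++ [(x, c)]))
            = ((pvDedup cs).filter (fun y => decide (y ≠ c))).filter
              (fun y => decide (y ≠ x ∧ (x, y) ∉ pc ∧ (y, x) ∉ pc)) := by
          rw [List.filter_filter]
          refine List.filter_congr ?_
          intro y _
          rw [Bool.eq_iff_iff]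
          simp only [Bool.and_eq_true, decide_eq_true_eq, List.mem_append,
            List.mem_singleton, Prod.mk.injEq, ne_eq]
          tauto
        rw [hstep, ih, List.filter_cons_of_pos (by simp [hcx, hmem.1, hmem.2]), ← hfil]
        simp
      · have hstep : pvStepA pc (x, c) = pc := by
          by_cases h1 : (x, c) ∈ pc
          · simp [pvStepA, h1]
          · have h2 : (c, x) ∈ pc := by
              by_contra h2
              exact hmem ⟨h1, h2⟩
            simp [pvStepA, h2]
        have hF : (decide (c ≠ x ∧ (x, c) ∉ pc ∧ (c, x) ∉ pc)) = false :=
          decide_eq_false_iff_not.2 (fun h => hmem ⟨h.2.1, h.2.2⟩)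
        have hfil : ((pvDedup cs).filter (fun y => decide (y ≠ c))).filter
              (fun y => decide (y ≠ x ∧ (x, y) ∉ pc ∧ (y, x) ∉ pc))
            = (pvDedup cs).filter (fun y => decide (y ≠ x ∧ (x, y) ∉ pc ∧ (y, x) ∉ pc)) := by
          rw [List.filter_filter]
          refine List.filter_congr ?_
          intro y _
          by_cases hy : y = c
          · subst hy
            simp [hF]
          · simp [hy]
        rw [hstep, ih, List.filter_cons_of_neg (by simp [hF]), hfil]

-- pairs generated by rows for the elements of E, columns E ++ suf
def pvPairsPrefix : List Int → List Int → List (Int × Int)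
  | [], _ => []
  | e :: E, suf => (E ++ suf).map (fun y => (e, y)) ++ pvPairsPrefix E suf

theorem pv_prefix_nil : ∀ E : List Int, pvPairsPrefix E [] = pvPairsFrom E := by
  intro E
  induction E with
  | nil => simp [pvPairsPrefix, pvPairsFrom]
  | cons e E ih => simp [pvPairsPrefix, pvPairsFrom, ih]

theorem pv_prefix_shift (x : Int) (R : List Int) : ∀ E : List Int,
    pvPairsPrefix E (x :: R) ++ R.map (fun y => (x, y)) = pvPairsPrefix (E ++ [x]) R := by
  intro E
  induction E with
  | nil => simp [pvPairsPrefix]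
  | cons e E ih =>
    simp only [pvPairsPrefix, List.cons_append, List.append_assoc, ih]
    simp

theorem pv_prefix_mem (a b : Int) : ∀ (E suf : List Int),
    (a, b) ∈ pvPairsPrefix E suf → a ∈ E ∧ b ∈ E ++ suf := by
  intro E
  induction E with
  | nil => intro suf h; simp [pvPairsPrefix] at h
  | cons e E ih =>
    intro suf h
    rw [pvPairsPrefix] at h
    rcases List.mem_append.1 h with h | h
    · obtain ⟨y, hy, heq⟩ := List.mem_map.1 h
      injection heq with h1 h2
      subst h1; subst h2
      refine ⟨List.mem_cons_self .., ?_⟩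
      simp only [List.cons_append, List.mem_cons]
      exact Or.inr hy
    · obtain ⟨h1, h2⟩ := ih suf h
      refine ⟨List.mem_cons_of_mem _ h1, ?_⟩
      simp only [List.cons_append, List.mem_cons]
      right
      simpa using h2

theorem pv_prefix_covered (x y : Int) : ∀ (E suf : List Int), x ∈ E → y ∈ E ++ suf → x ≠ y →
    (x, y) ∈ pvPairsPrefix E suf ∨ (y, x) ∈ pvPairsPrefix E suf := by
  intro E
  induction E with
  | nil => simp
  | cons e E ih =>
    intro suf hx hy hxy
    have hy' : y = e ∨ y ∈ E ++ suf := by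
      rcases (by simpa using hy : y = e ∨ y ∈ E ∨ y ∈ suf) with h | h | h
      · exact Or.inl h
      · exact Or.inr (List.mem_append.2 (Or.inl h))
      · exact Or.inr (List.mem_append.2 (Or.inr h))
    rcases List.mem_cons.1 hx with rfl | hxE
    · left
      rw [pvPairsPrefix]
      refine List.mem_append.2 (Or.inl (List.mem_map.2 ⟨y, ?_, rfl⟩))
      rcases hy' with rfl | h
      · exact absurd rfl hxy
      · exact h
    · rcases hy' with rfl | hy''
      · right
        rw [pvPairsPrefix]
        exact List.mem_append.2 (Or.inl (List.mem_map.2 ⟨x, List.mem_append.2 (Or.inl hxE), rfl⟩))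
      · rcases ih suf hxE hy'' hxy with h | h
        · left; rw [pvPairsPrefix]; exact List.mem_append.2 (Or.inr h)
        · right; rw [pvPairsPrefix]; exact List.mem_append.2 (Or.inr h)

-- a row for a NEW key x (the head of the remaining distinct suffix) keeps exactly
-- the keys after x
theorem pv_filter_new (x : Int) (E R : List Int) (hnd : (E ++ x :: R).Nodup) :
    (E ++ x :: R).filter (fun y => decide (y ≠ x ∧
        (x, y) ∉ pvPairsPrefix E (x :: R) ∧ (y, x) ∉ pvPairsPrefix E (x :: R))) = R := by
  have hxE : x ∉ E := by
    intro h
    exact (List.disjoint_of_nodup_append hnd) h (List.mem_cons_self ..)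
  have h1 : E.filter (fun y => decide (y ≠ x ∧
      (x, y) ∉ pvPairsPrefix E (x :: R) ∧ (y, x) ∉ pvPairsPrefix E (x :: R))) = [] := by
    refine List.filter_eq_nil_iff.2 ?_
    intro y hyE
    simp only [decide_eq_true_eq]
    rintro ⟨hyx, h2, h3⟩
    rcases pv_prefix_covered y x E (x :: R) hyE (by simp) hyx with h | h
    · exact h3 h
    · exact h2 h
  have h2 : R.filter (fun y => decide (y ≠ x ∧
      (x, y) ∉ pvPairsPrefix E (x :: R) ∧ (y, x) ∉ pvPairsPrefix E (x :: R))) = R := by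
    refine List.filter_eq_self.2 ?_
    intro y hyR
    have hnd2 := List.nodup_append.1 hnd
    have hxy : y ≠ x := by
      rintro rfl
      exact (List.nodup_cons.1 hnd2.2.1).1 hyR
    simp only [decide_eq_true_eq]
    refine ⟨hxy, fun h => ?_, fun h => ?_⟩
    · exact hxE (pv_prefix_mem x y E (x :: R) h).1
    · exact hnd2.2.2 y (pv_prefix_mem y x E (x :: R) h).1 y (by simp [hyR]) rfl
  rw [List.filter_append, List.filter_cons_of_neg (by simp), h1, h2]
  simp

-- a row for an already-seen key x adds nothing
theorem pv_filter_dup (x : Int) (E suf : List Int) (hx : x ∈ E) :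
    (E ++ suf).filter (fun y => decide (y ≠ x ∧
        (x, y) ∉ pvPairsPrefix E suf ∧ (y, x) ∉ pvPairsPrefix E suf)) = [] := by
  refine List.filter_eq_nil_iff.2 ?_
  intro y hy
  simp only [decide_eq_true_eq]
  rintro ⟨hyx, h2, h3⟩
  rcases pv_prefix_covered x y E suf hx hy (Ne.symm hyx) with h | h
  · exact h2 h
  · exact h3 h

theorem pv_main (keys : List Int) : ∀ (rest E suf : List Int),
    E ++ suf = pvDedup keys → (E ++ suf).Nodup →
    pvDedup (rest.filter (fun r => decide (r ∉ E))) = suf →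
    (rest.flatMap (fun i => keys.map (fun j => (i, j)))).foldl pvStepA (pvPairsPrefix E suf)
      = pvPairsFrom (E ++ suf) := by
  intro rest
  induction rest with
  | nil =>
    intro E suf h1 _ h3
    simp only [List.filter_nil, pvDedup] at h3
    subst h3
    simp [pv_prefix_nil]
  | cons r rest ih =>
    intro E suf h1 hnd h3
    rw [List.flatMap_cons, List.foldl_append, pv_row, h1.symm]
    by_cases hrE : r ∈ E
    · rw [pv_filter_dup r E suf hrE]
      simp only [List.map_nil, List.append_nil]
      refine ih E suf h1 hnd ?_
      rw [← h3, List.filter_cons_of_neg (by simp [hrE])]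
    · rw [List.filter_cons_of_pos (by simp [hrE]), pvDedup] at h3
      obtain ⟨R, rfl⟩ : ∃ R, suf = r :: R := ⟨_, h3.symm⟩
      obtain ⟨-, hR⟩ := List.cons.inj h3
      rw [pv_filter_new r E R hnd, pv_prefix_shift]
      have := ih (E ++ [r]) R (by simpa using h1) (by simpa using hnd)
      rw [List.append_assoc] at this
      refine this ?_
      rw [← hR, List.filter_filter]
      congr 1
      refine List.filter_congr ?_
      intro y _
      by_cases hy : y = r <;> simp [hy, hrE]

theorem get_projection_combinations_spec : Claim_equal_get_projection_combinations := by
  intro keys _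
  unfold Spec_get_projection_combinations get_projection_combinations get_projection_combinations_alt
  rw [pv_distinct_eq]
  have h := pv_main keys keys [] (pvDedup keys) (by simp) (by simpa using pv_nodup_dedup keys)
    (by simp)
  simpa [pvPairsPrefix] using h
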